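-- pv_equiv track=rewrite | github.com/Arsen1302/Code-copy-detector | TestData/solutions/problem_1405_3.py | solution_1405_3
-- ===== SOURCE A (Python) =====
-- from typing import List
--
-- def solution_1405_3(s: str, queries: List[List[int]]) -> List[int]:
--     prefix = [0]
--     stack = []
--     upper = [-1]*len(s)
--     lower = [-1]*len(s)
--     lo = -1
--     for i, ch in enumerate(s):
--         prefix.append(prefix[-1] + (ch == '*'))
--         stack.append(i)
--         if ch == '|':
--             while stack: upper[stack.pop()] = i
--             lo = i
--         lower[i] = lo
--
--     ans = []
--     for x, y in queries:
--         lo = upper[x]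
--         hi = lower[y]
--         if hi != -1 and lo != -1 and lo <= hi: ans.append(prefix[hi+1] - prefix[lo])
--         else: ans.append(0)
--     return ans
-- ===== SOURCE B (Python) =====
-- from typing import List
--
-- def solution_1405_3(s: str, queries: List[List[int]]) -> List[int]:
--     n = len(s)
--     prefix = [0]
--     lower = []
--     lo = -1
--     for i, ch in enumerate(s):
--         prefix.append(prefix[-1] + (ch == '*'))
--         if ch == '|':
--             lo = i
--         lower.append(lo)
--     upper = [-1] * n
--     nxt = -1
--     for i in range(n - 1, -1, -1):
--         if s[i] == '|':
--             nxt = i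
--         upper[i] = nxt
--     ans = []
--     for x, y in queries:
--         a = upper[x]
--         b = lower[y]
--         if a != -1 and b != -1 and a <= b:
--             ans.append(prefix[b + 1] - prefix[a])
--         else:
--             ans.append(0)
--     return ans
-- ===== Notes on version B (the rewrite author's own statement) =====
-- stated objective: simpler
-- what changed: A builds the upper (next-bar) table by pushing every index on a stack and popping them all whenever a '|' is seen; B drops the stack entirely and fills upper with a separate backward scan that tracks the most recent '|' (init -1), keeping the prefix-sum/lower forward pass and the O(1) query loop.
import Mathlib
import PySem

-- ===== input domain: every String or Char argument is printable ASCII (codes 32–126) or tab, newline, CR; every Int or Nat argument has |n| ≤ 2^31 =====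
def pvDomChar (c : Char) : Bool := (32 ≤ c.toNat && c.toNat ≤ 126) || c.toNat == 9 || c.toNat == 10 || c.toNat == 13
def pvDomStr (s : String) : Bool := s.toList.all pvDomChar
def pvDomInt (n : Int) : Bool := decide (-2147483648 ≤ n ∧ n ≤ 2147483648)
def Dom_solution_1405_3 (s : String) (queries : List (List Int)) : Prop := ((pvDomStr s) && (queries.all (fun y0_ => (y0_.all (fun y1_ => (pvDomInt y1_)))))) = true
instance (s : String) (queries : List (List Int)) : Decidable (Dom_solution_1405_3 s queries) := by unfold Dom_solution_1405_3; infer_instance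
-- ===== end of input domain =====

-- B replaces A's stack-based push-all/pop-all preprocessing of the `upper` table by a plain
-- backward scan tracking the most recent '|'; objective: simpler (no stack), same cost.

-- ===== PORT A =====
-- the query loop, identical character-for-character in A and B (shared helper)
def pvAnswer (pr upper lower : List Int) (queries : List (List Int)) : List Int :=
  queries.foldl (fun ans q =>
    match q with
    | [x, y] =>
      let lo := (PySem.List.pyGet? upper x).getD 0
      let hi := (PySem.List.pyGet? lower y).getD 0
      if hi ≠ -1 ∧ lo ≠ -1 ∧ lo ≤ hi then
        ans ++ [(PySem.List.pyGet? pr (hi + 1)).getD 0 - (PySem.List.pyGet? pr lo).getD 0]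
      else ans ++ [0]
    | _ => ans ++ [0]) []

-- one iteration of A's forward loop: prefix append, stack push, pop-all on a bar, lower[i] = lo
def stepA (st : List Int × List Int × List Int × List Int × Int) (ic : Int × Char) :
    List Int × List Int × List Int × List Int × Int :=
  let (pr, stack, upper, lower, lo) := st
  let (i, ch) := ic
  let pr := pr ++ [pr.getLast! + (if ch = '*' then (1 : Int) else 0)]
  let stack := stack ++ [i]
  if ch = '|' then
    (pr, [], stack.reverse.foldl (fun u j => u.set j.toNat i) upper, lower.set i.toNat i, i)
  else
    (pr, stack, upper, lower.set i.toNat lo, lo)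

def solution_1405_3 (s : String) (queries : List (List Int)) : List Int :=
  let cs := s.toList
  let st := (PySem.List.enumerate cs).foldl stepA
      ([(0 : Int)], [], List.replicate cs.length (-1), List.replicate cs.length (-1), -1)
  pvAnswer st.1 st.2.2.1 st.2.2.2.1 queries

-- ===== PORT B =====
-- one iteration of B's forward loop: prefix append, lower append (no stack, no upper here)
def stepB (st : List Int × List Int × Int) (ic : Int × Char) : List Int × List Int × Int :=
  let (pr, lower, lo) := st
  let (i, ch) := ic
  let pr := pr ++ [pr.getLast! + (if ch = '*' then (1 : Int) else 0)]
  let lo := if ch = '|' then i else lo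
  (pr, lower ++ [lo], lo)

-- B's backward loop (i from n-1 down to 0): nxt := i on a bar, upper[i] := nxt
def upperScan : List (Int × Char) → Int × List Int
  | [] => (-1, [])
  | (i, ch) :: rest =>
    let (nxt, tail) := upperScan rest
    let nxt := if ch = '|' then i else nxt
    (nxt, nxt :: tail)

def solution_1405_3_alt (s : String) (queries : List (List Int)) : List Int :=
  let cs := s.toList
  let st := (PySem.List.enumerate cs).foldl stepB ([(0 : Int)], [], -1)
  let upper := (upperScan (PySem.List.enumerate cs)).2
  pvAnswer st.1 upper st.2.1 queries

-- ===== PRECONDITION & SPEC =====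
-- Pre_ excludes exactly the inputs where Python A raises: a query row that is not a pair
-- (ValueError on unpacking) or whose index is out of range for s (IndexError).
def Pre_solution_1405_3 (s : String) (queries : List (List Int)) : Prop :=
  ∀ q ∈ queries, q.length = 2 ∧
    ∀ v ∈ q, -(s.toList.length : Int) ≤ v ∧ v < (s.toList.length : Int)
instance (s : String) (queries : List (List Int)) : Decidable (Pre_solution_1405_3 s queries) := by
  unfold Pre_solution_1405_3; infer_instance

def pvWitness_solution_1405_3 : String × List (List Int) := ("**|*|*", [[0, 4], [1, 3], [-6, -1]])

def Spec_solution_1405_3 (s : String) (queries : List (List Int)) (out : List Int) : Prop :=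
  out = solution_1405_3_alt s queries
instance (s : String) (queries : List (List Int)) (out : List Int) : Decidable (Spec_solution_1405_3 s queries out) := by
  unfold Spec_solution_1405_3; infer_instance

-- ===== CLAIM (what is proved, stated in full; the proofs are below) =====
def Claim_equal_solution_1405_3 : Prop := ∀ (s : String) (queries : List (List Int)),
  Dom_solution_1405_3 s queries → Pre_solution_1405_3 s queries →
  Spec_solution_1405_3 s queries (solution_1405_3 s queries)

-- ===== LEMMAS AND PROOFS =====
def fbIn : List Char → Int → Int
  | [], _ => -1
  | c :: rest, j => if c = '|' then j else fbIn rest (j + 1)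

theorem set_append_len {α : Type} (xs : List α) (c v : α) (ys : List α) :
    (xs ++ c :: ys).set xs.length v = xs ++ v :: ys := by
  induction xs with
  | nil => rfl
  | cons a xs ih => simp [ih]

theorem fbIn_append (l1 l2 : List Char) (j : Int) (hj : 0 ≤ j) :
    fbIn (l1 ++ l2) j = if fbIn l1 j = -1 then fbIn l2 (j + l1.length) else fbIn l1 j := by
  induction l1 generalizing j with
  | nil => simp [fbIn]
  | cons c r ih =>
    by_cases hc : c = '|'
    · simp [fbIn, hc]; omega
    · simp only [List.cons_append, fbIn, if_neg hc, ih (j+1) (by omega)]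
      split_ifs with h
      · congr 1; simp only [List.length_cons]; push_cast; ring
      · rfl

theorem upperScan_spec (cs : List Char) : ∀ (k : Int),
    upperScan (PySem.List.enumerate cs k) =
      (fbIn cs k, (List.range cs.length).map (fun t => fbIn (cs.drop t) (k + t))) := by
  induction cs with
  | nil => intro k; simp [upperScan, fbIn, PySem.List.enumerate]
  | cons c r ih =>
    intro k
    rw [PySem.List.enumerate_cons, List.length_cons, List.range_succ_eq_map]
    simp only [upperScan, ih (k+1), List.map_cons, List.map_map]
    refine Prod.ext ?_ ?_
    · simp [fbIn]
    · show _ :: _ = _ :: _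
      congr 1
      · simp [fbIn]
      · apply List.map_congr_left
        intro t _
        simp only [Function.comp_apply, List.drop_succ_cons]
        congr 1
        push_cast
        ring

def bLast : List Char → Nat → Nat → Nat
  | [], _, b => b
  | c :: rest, k, b => bLast rest (k + 1) (if c = '|' then k + 1 else b)

theorem foldl_set_getElem? (v : Int) : ∀ (L : List Int) (u : List Int) (t : Nat),
    (∀ j ∈ L, 0 ≤ j) →
    (L.foldl (fun u j => u.set j.toNat v) u)[t]? =
      if (t : Int) ∈ L then (if t < u.length then some v else none) else u[t]? := by
  intro L
  induction L with
  | nil => intro u t _; simp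
  | cons j L' ih =>
    intro u t hL
    rw [List.foldl_cons, ih _ t (fun x hx => hL x (List.mem_cons_of_mem _ hx))]
    have hj : 0 ≤ j := hL j (List.mem_cons_self ..)
    by_cases h1 : (t : Int) ∈ L'
    · simp [h1, List.mem_cons]
    · have hjt : ((t : Int) = j) ↔ (j.toNat = t) := by omega
      by_cases h2 : (t : Int) = j
      · simp [h2, List.getElem?_set, hjt.mp h2]
      · have : ¬ (j.toNat = t) := fun h => h2 (hjt.mpr h)
        simp [h1, h2, this]

theorem foldAB (cs : List Char) : ∀ (p : List Char) (pr lB : List Int) (lo : Int) (b : Nat),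
    lB.length = p.length →
    b ≤ p.length →
    (∀ t : Nat, t < b → fbIn (List.drop t p) (t : Int) ≠ -1) →
    (∀ t : Nat, b ≤ t → fbIn (List.drop t p) (t : Int) = -1) →
    (PySem.List.enumerate cs (p.length : Int)).foldl stepA
        (pr, (List.range' b (p.length - b)).map Int.ofNat,
         (List.range (p.length + cs.length)).map (fun t => fbIn (List.drop t p) (t : Int)),
         lB ++ List.replicate cs.length (-1), lo) =
      (((PySem.List.enumerate cs (p.length : Int)).foldl stepB (pr, lB, lo)).1,
       (List.range' (bLast cs p.length b) (p.length + cs.length - bLast cs p.length b)).map Int.ofNat,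
       (List.range (p.length + cs.length)).map (fun t => fbIn (List.drop t (p ++ cs)) (t : Int)),
       ((PySem.List.enumerate cs (p.length : Int)).foldl stepB (pr, lB, lo)).2.1,
       ((PySem.List.enumerate cs (p.length : Int)).foldl stepB (pr, lB, lo)).2.2) := by
  induction cs with
  | nil =>
    intro p pr lB lo b h1 h2 h3 h4
    simp [PySem.List.enumerate, bLast]
  | cons c cs' ih =>
    intro p pr lB lo b h1 h2 h3 h4
    rw [PySem.List.enumerate_cons]
    simp only [List.foldl_cons, stepA, stepB]
    by_cases hc : c = '|'
    · simp only [hc, ↓reduceIte, List.length_cons]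
      have hNN : p.length + (cs'.length + 1) = p.length + 1 + cs'.length := by omega
      simp only [hNN]
      have hnonneg : ∀ j ∈ (((List.range' b (p.length - b)).map Int.ofNat) ++ [(p.length : Int)]).reverse, 0 ≤ j := by
        intro j hj
        simp at hj
        rcases hj with rfl | ⟨a, _, rfl⟩ <;> omega
      have hmem : ∀ t : Nat, ((t : Int) ∈ (((List.range' b (p.length - b)).map Int.ofNat) ++ [(p.length : Int)]).reverse) ↔ (b ≤ t ∧ t ≤ p.length) := by
        intro t
        simp
        omega
      have hU : (((List.range' b (p.length - b)).map Int.ofNat) ++ [(p.length : Int)]).reverse.foldl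
            (fun u j => u.set j.toNat (p.length : Int))
            ((List.range (p.length + 1 + cs'.length)).map (fun t => fbIn (List.drop t p) (t : Int)))
          = (List.range (p.length + 1 + cs'.length)).map (fun t => fbIn (List.drop t (p ++ ['|'])) (t : Int)) := by
        apply List.ext_getElem?
        intro t
        rw [foldl_set_getElem? _ _ _ t hnonneg]
        have hm := hmem t
        have hg : (List.range (p.length + 1 + cs'.length))[t]? = if t < p.length + 1 + cs'.length then some t else none := by
          split_ifs with htN <;> simp [htN]
        by_cases htN : t < p.length + 1 + cs'.length
        · simp only [List.getElem?_map, List.length_map, List.length_range, hg, if_pos htN,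
            Option.map_some]
          by_cases hbt : b ≤ t ∧ t ≤ p.length
          · rw [if_pos (hm.mpr hbt)]
            rw [List.drop_append_of_le_length (by omega)]
            rw [fbIn_append _ _ _ (by omega), if_pos (h4 t hbt.1)]
            simp only [fbIn, ↓reduceIte, List.length_drop]
            congr 1
            omega
          · rw [if_neg (fun hx => hbt (hm.mp hx))]
            congr 1
            by_cases htb : t < b
            · rw [List.drop_append_of_le_length (by omega)]
              rw [fbIn_append _ _ _ (by omega), if_neg (h3 t htb)]
            · have htp : p.length < t := by omega
              rw [List.drop_eq_nil_of_le (by omega), List.drop_eq_nil_of_le (by simp; omega)]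
        · simp only [List.getElem?_map, List.length_map, List.length_range, hg, if_neg htN,
            Option.map_none]
          split_ifs <;> rfl
      have hLB : (lB ++ List.replicate (cs'.length + 1) (-1 : Int)).set ((p.length : Int)).toNat (p.length : Int)
          = (lB ++ [(p.length : Int)]) ++ List.replicate cs'.length (-1) := by
        rw [List.replicate_succ, Int.toNat_natCast, ← h1, set_append_len]
        simp
      have h3' : ∀ t : Nat, t < p.length + 1 → fbIn (List.drop t (p ++ ['|'])) (t : Int) ≠ -1 := by
        intro t ht
        rw [List.drop_append_of_le_length (by omega)]
        rw [fbIn_append _ _ _ (by omega)]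
        split_ifs with h
        · simp only [fbIn, ↓reduceIte, List.length_drop]
          intro hcon
          omega
        · exact h
      have h4' : ∀ t : Nat, p.length + 1 ≤ t → fbIn (List.drop t (p ++ ['|'])) (t : Int) = -1 := by
        intro t ht
        rw [List.drop_eq_nil_of_le (by simp; omega)]
        rfl
      have key := ih (p ++ ['|']) (pr ++ [pr.getLast! + if ('|' : Char) = '*' then 1 else 0])
        (lB ++ [(p.length : Int)]) (p.length : Int) (p.length + 1) (by simp [h1]) (by simp) h3' h4'
      simp only [List.length_append, List.length_cons, List.length_nil] at key
      rw [hU, hLB]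
      simp only [Nat.zero_add, Nat.sub_self, List.range'_zero, List.map_nil, Nat.cast_add,
        Nat.cast_one] at key
      simp only [bLast, ↓reduceIte, show p ++ '|' :: cs' = (p ++ ['|']) ++ cs' from by simp]
      exact key
    · simp only [if_neg hc, List.length_cons]
      have hNN : p.length + (cs'.length + 1) = p.length + 1 + cs'.length := by omega
      simp only [hNN]
      have hStack : ((List.range' b (p.length - b)).map Int.ofNat) ++ [(p.length : Int)]
          = (List.range' b (p.length + 1 - b)).map Int.ofNat := by
        rw [show p.length + 1 - b = (p.length - b) + 1 from by omega, List.range'_1_concat,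
          List.map_append]
        simp [show b + (p.length - b) = p.length from by omega]
      have hUeq : (List.range (p.length + 1 + cs'.length)).map (fun t => fbIn (List.drop t p) (t : Int))
          = (List.range (p.length + 1 + cs'.length)).map (fun t => fbIn (List.drop t (p ++ [c])) (t : Int)) := by
        apply List.map_congr_left
        intro t _
        by_cases htp : t ≤ p.length
        · rw [List.drop_append_of_le_length (by omega), fbIn_append _ _ _ (by omega)]
          split_ifs with h
          · rw [h]; simp [fbIn, hc]
          · rfl
        · rw [List.drop_eq_nil_of_le (by omega), List.drop_eq_nil_of_le (by simp; omega)]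
      have hLo : (lB ++ List.replicate (cs'.length + 1) (-1 : Int)).set ((p.length : Int)).toNat lo
          = (lB ++ [lo]) ++ List.replicate cs'.length (-1) := by
        rw [List.replicate_succ, Int.toNat_natCast, ← h1, set_append_len]
        simp
      have h3' : ∀ t : Nat, t < b → fbIn (List.drop t (p ++ [c])) (t : Int) ≠ -1 := by
        intro t ht
        rw [List.drop_append_of_le_length (by omega), fbIn_append _ _ _ (by omega)]
        split_ifs with h
        · exact absurd h (h3 t ht)
        · exact h3 t ht
      have h4' : ∀ t : Nat, b ≤ t → fbIn (List.drop t (p ++ [c])) (t : Int) = -1 := by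
        intro t ht
        by_cases htp : t ≤ p.length
        · rw [List.drop_append_of_le_length (by omega), fbIn_append _ _ _ (by omega),
            if_pos (h4 t ht)]
          simp [fbIn, hc]
        · rw [List.drop_eq_nil_of_le (by simp; omega)]
          rfl
      have key := ih (p ++ [c]) (pr ++ [pr.getLast! + if c = '*' then 1 else 0])
        (lB ++ [lo]) lo b (by simp [h1]) (by simp; omega) h3' h4'
      simp only [List.length_append, List.length_cons, List.length_nil, Nat.zero_add,
        Nat.cast_add, Nat.cast_one] at key
      rw [hLo, hUeq, hStack]
      simp only [bLast, if_neg hc, show p ++ c :: cs' = (p ++ [c]) ++ cs' from by simp]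
      exact key

-- ===== VERDICT (by name: the statement is the Claim_ definition above) =====
theorem solution_1405_3_spec : Claim_equal_solution_1405_3 := by
  unfold Claim_equal_solution_1405_3
  intro s queries _ _
  unfold Spec_solution_1405_3 solution_1405_3 solution_1405_3_alt
  have h := foldAB s.toList [] [(0 : Int)] [] (-1) 0 rfl (Nat.zero_le _)
    (fun t ht => absurd ht (by omega)) (fun t _ => by simp [fbIn])
  simp only [List.length_nil, Nat.cast_zero, Nat.zero_add, Nat.sub_zero, List.range'_zero,
    List.map_nil, List.nil_append, List.drop_nil] at h
  have hrep : List.map (fun t : Nat => fbIn [] (t : Int)) (List.range s.toList.length)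
      = List.replicate s.toList.length (-1) := by
    simp [fbIn, List.map_const']
  rw [hrep] at h
  dsimp only
  rw [h, upperScan_spec s.toList 0]
  simp only [zero_add]
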